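-- pv_equiv track=rewrite | github.com/tomhoma/persona | scripts/enhanced_narrative_builder.py | get_career_domain
-- ===== SOURCE A (Python) =====
-- CAREER_DOMAINS = {
--     'entertainment': ['Q33999', 'Q177220', 'Q488205', 'Q10800557', 'Q10798782', 'Q2405480',
--                      'Q4610556', 'Q2259451', 'Q245068'],  # actors, singers, comedians
--     'sports': ['Q937857', 'Q11513337', 'Q10833314', 'Q10871364', 'Q14089670',
--                'Q10843402', 'Q10843263', 'Q15117302', 'Q2066131'],  # athletes
--     'creative_arts': ['Q2526255', 'Q3455803', 'Q3286043', 'Q1414443', 'Q1028181',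
--                       'Q33231', 'Q15296811', 'Q483501', 'Q266569'],  # directors, artists
--     'media': ['Q947873', 'Q1329383', 'Q2722764', 'Q13590141', 'Q7042855'],  # presenters, influencers
--     'music': ['Q639669', 'Q855091', 'Q36834', 'Q753110', 'Q130857',
--               'Q5716684', 'Q2643890', 'Q386854'],  # musicians
--     'politics': ['Q82955', 'Q372436'],  # politicians
--     'business': ['Q131524', 'Q5322166', 'Q5716455'],  # entrepreneurs, designers
--     'writing': ['Q36180', 'Q6625963', 'Q15980158', 'Q214917', 'Q1930187']  # writers, journalists
-- }
--
-- def get_career_domain(occupations):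
--     """Determine primary career domain from occupation QIDs."""
--     occupation_qids = {occ.get('qid') for occ in occupations}
--
--     domain_scores = {}
--     for domain, domain_qids in CAREER_DOMAINS.items():
--         overlap = len(occupation_qids.intersection(set(domain_qids)))
--         if overlap > 0:
--             domain_scores[domain] = overlap
--
--     if domain_scores:
--         return max(domain_scores, key=domain_scores.get)
--     return 'other'
-- ===== SOURCE B (Python) =====
-- CAREER_DOMAINS = {
--     'entertainment': ['Q33999', 'Q177220', 'Q488205', 'Q10800557', 'Q10798782', 'Q2405480',
--                      'Q4610556', 'Q2259451', 'Q245068'],  # actors, singers, comedians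
--     'sports': ['Q937857', 'Q11513337', 'Q10833314', 'Q10871364', 'Q14089670',
--                'Q10843402', 'Q10843263', 'Q15117302', 'Q2066131'],  # athletes
--     'creative_arts': ['Q2526255', 'Q3455803', 'Q3286043', 'Q1414443', 'Q1028181',
--                       'Q33231', 'Q15296811', 'Q483501', 'Q266569'],  # directors, artists
--     'media': ['Q947873', 'Q1329383', 'Q2722764', 'Q13590141', 'Q7042855'],  # presenters, influencers
--     'music': ['Q639669', 'Q855091', 'Q36834', 'Q753110', 'Q130857',
--               'Q5716684', 'Q2643890', 'Q386854'],  # musicians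
--     'politics': ['Q82955', 'Q372436'],  # politicians
--     'business': ['Q131524', 'Q5322166', 'Q5716455'],  # entrepreneurs, designers
--     'writing': ['Q36180', 'Q6625963', 'Q15980158', 'Q214917', 'Q1930187']  # writers, journalists
-- }
--
-- # Inverted index: each QID belongs to exactly one domain.
-- _QID_TO_DOMAIN = {qid: domain for domain, qids in CAREER_DOMAINS.items() for qid in qids}
--
--
-- def get_career_domain(occupations):
--     """Determine primary career domain from occupation QIDs."""
--     qids = {occ.get('qid') for occ in occupations}
--
--     counts = {}
--     for qid in qids:
--         domain = _QID_TO_DOMAIN.get(qid)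
--         if domain is not None:
--             counts[domain] = counts.get(domain, 0) + 1
--
--     best, best_count = 'other', 0
--     for domain in CAREER_DOMAINS:
--         count = counts.get(domain, 0)
--         if count > best_count:
--             best, best_count = domain, count
--     return best
-- ===== Notes on version B (the rewrite author's own statement) =====
-- stated objective: alternative
-- what changed: Replaces A's per-domain set-intersection scoring and max-over-dict selection with a single inverted QID-to-domain index, one tally pass over the deduplicated QIDs, and an in-order argmax scan over CAREER_DOMAINS (ties resolve to the earliest domain, as Python's max does).
import Mathlib
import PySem

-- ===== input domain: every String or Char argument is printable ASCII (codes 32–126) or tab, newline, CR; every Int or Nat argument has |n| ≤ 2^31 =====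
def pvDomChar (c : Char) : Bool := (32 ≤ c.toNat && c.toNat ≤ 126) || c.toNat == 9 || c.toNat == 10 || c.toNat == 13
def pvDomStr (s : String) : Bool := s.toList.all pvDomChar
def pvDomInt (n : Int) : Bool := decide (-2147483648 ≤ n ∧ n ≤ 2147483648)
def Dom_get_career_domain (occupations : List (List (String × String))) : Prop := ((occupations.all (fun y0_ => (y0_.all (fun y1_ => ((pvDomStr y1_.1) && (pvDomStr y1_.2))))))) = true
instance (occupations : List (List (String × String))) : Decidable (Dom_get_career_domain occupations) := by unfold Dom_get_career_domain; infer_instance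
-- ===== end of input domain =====

-- B replaces A's per-domain set intersections by one inverted QID→domain index and a
-- single tally over the deduplicated QIDs, then an in-order argmax scan (objective: alternative).

-- shared module constant CAREER_DOMAINS (insertion order of the Python dict)
def careerDomains : List (String × List String) := [
  ("entertainment", ["Q33999", "Q177220", "Q488205", "Q10800557", "Q10798782", "Q2405480",
                     "Q4610556", "Q2259451", "Q245068"]),
  ("sports", ["Q937857", "Q11513337", "Q10833314", "Q10871364", "Q14089670",
              "Q10843402", "Q10843263", "Q15117302", "Q2066131"]),
  ("creative_arts", ["Q2526255", "Q3455803", "Q3286043", "Q1414443", "Q1028181",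
                     "Q33231", "Q15296811", "Q483501", "Q266569"]),
  ("media", ["Q947873", "Q1329383", "Q2722764", "Q13590141", "Q7042855"]),
  ("music", ["Q639669", "Q855091", "Q36834", "Q753110", "Q130857",
             "Q5716684", "Q2643890", "Q386854"]),
  ("politics", ["Q82955", "Q372436"]),
  ("business", ["Q131524", "Q5322166", "Q5716455"]),
  ("writing", ["Q36180", "Q6625963", "Q15980158", "Q214917", "Q1930187"])]

-- ===== PORT A =====
def get_career_domain (occupations : List (List (String × String))) : String :=
  let occupation_qids : PySem.Set (Option String) :=
    PySem.Set.ofList (occupations.map (fun occ => (PySem.Dict.mk occ).get? "qid"))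
  let domain_scores : PySem.Dict String Int :=
    careerDomains.foldl (fun ds p =>
      let overlap : Int := PySem.Set.len
        (PySem.Set.inter occupation_qids (PySem.Set.ofList (p.2.map some)))
      if overlap > 0 then ds.insert p.1 overlap else ds) PySem.Dict.empty
  -- `if domain_scores: return max(domain_scores, key=domain_scores.get)` : max? is none
  -- exactly when the dict is empty; every key is present, so domain_scores.get k = getD k 0.
  match PySem.List.max? domain_scores.keys (fun k => domain_scores.getD k 0) with
  | some m => m
  | none => "other"

-- ===== PORT B =====
-- B-side helper: _QID_TO_DOMAIN, the inverted index (each QID occurs in exactly one domain)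
def qidToDomain : PySem.Dict String String :=
  careerDomains.foldl (fun d p => p.2.foldl (fun d q => d.insert q p.1) d) PySem.Dict.empty

def get_career_domain_alt (occupations : List (List (String × String))) : String :=
  let qids : PySem.Set (Option String) :=
    PySem.Set.ofList (occupations.map (fun occ => (PySem.Dict.mk occ).get? "qid"))
  -- tally over the set: the resulting dict is only looked up afterwards, so iteration
  -- order of the Python set cannot influence the result
  let counts : PySem.Dict String Int :=
    qids.foldl (fun c q =>
      match q.bind qidToDomain.get? with
      | some domain => c.insert domain (c.getD domain 0 + 1)
      | none => c) PySem.Dict.empty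
  (careerDomains.foldl (fun (best : String × Int) p =>
      let count := counts.getD p.1 0
      if count > best.2 then (p.1, count) else best) ("other", (0 : Int))).1

-- ===== PRECONDITION & SPEC =====
def Spec_get_career_domain (occupations : List (List (String × String))) (out : String) : Prop := out = get_career_domain_alt occupations
instance (occupations : List (List (String × String))) (out : String) : Decidable (Spec_get_career_domain occupations out) := by unfold Spec_get_career_domain; infer_instance

-- ===== CLAIM (what is proved, stated in full; the proofs are below) =====
def Claim_equal_get_career_domain : Prop := ∀ (occupations : List (List (String × String))), Dom_get_career_domain occupations → Spec_get_career_domain occupations (get_career_domain occupations)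

-- ===== LEMMAS AND PROOFS =====

def allQids : List String := careerDomains.flatMap Prod.snd

-- a QID hits domain p.1 through the inverted index iff it is one of p's QIDs
set_option maxRecDepth 200000 in
lemma hit_eq (p : String × List String) (hp : p ∈ careerDomains) (q : Option String) :
    (q.bind qidToDomain.get? == some p.1) = decide (q ∈ p.2.map some) := by
  cases q with
  | none => simp
  | some s =>
    by_cases hs : s ∈ allQids
    · have hall : allQids.all (fun s => careerDomains.all (fun p =>
          ((qidToDomain.get? s == some p.1) == decide (s ∈ p.2)))) = true := by decide
      rw [List.all_eq_true] at hall
      have := hall s hs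
      rw [List.all_eq_true] at this
      have h2 := this p hp
      simp only [beq_iff_eq] at h2
      simp [h2]
    · have hk : qidToDomain.keys = allQids := by decide
      have hnone : qidToDomain.get? s = none := by
        rw [PySem.Dict.get?_eq_none_iff_not_mem_keys, hk]; exact hs
      have hsub : careerDomains.all (fun p => p.2.all (fun q => q ∈ allQids)) = true := by decide
      rw [List.all_eq_true] at hsub
      have hsub' := hsub p hp
      rw [List.all_eq_true] at hsub'
      have hnm : s ∉ p.2 := fun hm => hs (by simpa using hsub' s hm)
      simp [hnone, hnm]

-- the tally loop of B counts, for each domain, the QIDs of the set that hit it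
lemma counts_getD (S : List (Option String)) (c : PySem.Dict String Int) (d : String) :
    (S.foldl (fun c q =>
      match q.bind qidToDomain.get? with
      | some domain => c.insert domain (c.getD domain 0 + 1)
      | none => c) c).getD d 0
    = c.getD d 0 + (S.countP (fun q => q.bind qidToDomain.get? == some d) : Int) := by
  induction S generalizing c with
  | nil => simp
  | cons q t ih =>
    cases hq : q.bind qidToDomain.get? with
    | none =>
      simp only [List.foldl_cons, List.countP_cons, hq]
      rw [ih]
      simp
    | some dm =>
      simp only [List.foldl_cons, List.countP_cons, hq]
      rw [ih]
      by_cases hd : dm = d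
      · subst hd
        rw [PySem.Dict.getD_insert_self]
        simp
        ring
      · rw [PySem.Dict.getD_insert_of_ne _ _ _ (Ne.symm hd)]
        simp [hd]

-- A's overlap with domain p equals the number of QIDs of the set hitting p
lemma score_eq (p : String × List String) (hp : p ∈ careerDomains) (S : List (Option String)) :
    PySem.Set.len (PySem.Set.inter S (PySem.Set.ofList (p.2.map some)))
    = (S.countP (fun q => q.bind qidToDomain.get? == some p.1) : Int) := by
  have : PySem.Set.len (PySem.Set.inter S (PySem.Set.ofList (p.2.map some)))
      = ((S.filter (fun q => (PySem.Set.ofList (p.2.map some)).contains q)).length : Int) := rfl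
  rw [this]
  rw [show (List.filter (fun q => (PySem.Set.ofList (List.map some p.2)).contains q) S).length
      = S.countP (fun q => (PySem.Set.ofList (List.map some p.2)).contains q) from
      List.countP_eq_length_filter.symm]
  congr 1
  apply List.countP_congr
  intro q _
  rw [hit_eq p hp q]
  constructor
  · intro h; simpa [PySem.Set.contains_iff, PySem.Set.mem_ofList] using h
  · intro h; simpa [PySem.Set.contains_iff, PySem.Set.mem_ofList] using h

-- an insert-fold keyed by the first components reads back f
lemma getD_insfold (f : String → Int) :
    ∀ (l : List (String × List String)) (c : PySem.Dict String Int) (k : String),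
    (l.foldl (fun ds p => ds.insert p.1 (f p.1)) c).getD k 0
    = if k ∈ l.map Prod.fst then f k else c.getD k 0 := by
  intro l
  induction l with
  | nil => simp
  | cons p t ih =>
    intro c k
    simp only [List.foldl_cons, List.map_cons, List.mem_cons, ih]
    by_cases ht : k ∈ t.map Prod.fst
    · simp [ht]
    · by_cases hk : k = p.1
      · subst hk; simp [ht, PySem.Dict.getD_insert_self]
      · simp [ht, hk, PySem.Dict.getD_insert_of_ne _ _ _ hk]

-- the running-max fold only looks at the key values of list members and the accumulator
lemma maxfold_congr (k1 k2 : String → Int) :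
    ∀ (xs : List String) (acc : Option String),
    (∀ x ∈ xs, k1 x = k2 x) → (∀ m, acc = some m → k1 m = k2 m) →
    xs.foldl (fun acc x => match acc with
        | none => some x
        | some m => if k1 m < k1 x then some x else some m) acc
    = xs.foldl (fun acc x => match acc with
        | none => some x
        | some m => if k2 m < k2 x then some x else some m) acc := by
  intro xs
  induction xs with
  | nil => intro acc _ _; rfl
  | cons x t ih =>
    intro acc hx hacc
    simp only [List.foldl_cons]
    have hx' : k1 x = k2 x := hx x (List.mem_cons_self ..)
    cases acc with
    | none =>
      exact ih (some x) (fun y hy => hx y (List.mem_cons_of_mem _ hy))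
        (fun m hm => by cases hm; exact hx')
    | some m =>
      have hm' : k1 m = k2 m := hacc m rfl
      by_cases h : k2 m < k2 x
      · have h1 : k1 m < k1 x := by rw [hm', hx']; exact h
        have e1 : (match (some m : Option String) with
            | none => some x
            | some m => if k1 m < k1 x then some x else some m) = some x := by
          simp [h1]
        have e2 : (match (some m : Option String) with
            | none => some x
            | some m => if k2 m < k2 x then some x else some m) = some x := by
          simp [h]
        rw [e1, e2]
        exact ih (some x) (fun y hy => hx y (List.mem_cons_of_mem _ hy))
          (fun m hm => by cases hm; exact hx')
      · have h1 : ¬ k1 m < k1 x := by rw [hm', hx']; exact h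
        have e1 : (match (some m : Option String) with
            | none => some x
            | some m => if k1 m < k1 x then some x else some m) = some m := by
          simp [h1]
        have e2 : (match (some m : Option String) with
            | none => some x
            | some m => if k2 m < k2 x then some x else some m) = some m := by
          simp [h]
        rw [e1, e2]
        exact ih (some m) (fun y hy => hx y (List.mem_cons_of_mem _ hy))
          (fun m' hm => by cases hm; exact hm')

-- B's accumulator always carries (b, f b) after the first update
lemma selB_aux1 (f : String → Int) :
    ∀ (l : List String) (b : String),
    l.foldl (fun (best : String × Int) k => if f k > best.2 then (k, f k) else best) (b, f b)
    = ((l.foldl (fun m y => if f m < f y then y else m) b),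
       f (l.foldl (fun m y => if f m < f y then y else m) b)) := by
  intro l
  induction l with
  | nil => intro b; rfl
  | cons k t ih =>
    intro b
    simp only [List.foldl_cons]
    by_cases h : f b < f k
    · simpa [h] using ih k
    · simpa [h] using ih b

-- once the current maximum is positive, non-positive entries never win
lemma sel_aux2 (f : String → Int) :
    ∀ (l : List String) (m : String), 0 < f m →
    l.foldl (fun m y => if f m < f y then y else m) m
    = (l.filter (fun k => decide (0 < f k))).foldl (fun m y => if f m < f y then y else m) m := by
  intro l
  induction l with
  | nil => intro m _; rfl
  | cons y t ih =>
    intro m hm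
    by_cases hy : 0 < f y
    · simp only [List.filter_cons, decide_eq_true hy, if_pos, List.foldl_cons]
      by_cases h : f m < f y
      · simp only [if_pos h]; exact ih y hy
      · simp only [if_neg h]; exact ih m hm
    · have h : ¬ f m < f y := by omega
      simp only [List.filter_cons, List.foldl_cons, if_neg h]
      have : decide (0 < f y) = false := by simpa using hy
      rw [this]
      simp only [Bool.false_eq_true, if_false]
      exact ih m hm
-- (cont.)
lemma sel_aux3 (f : String → Int) :
    ∀ (l : List String) (m : String),
    l.foldl (fun acc x => match acc with
        | none => some x
        | some m => if f m < f x then some x else some m) (some m)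
    = some (l.foldl (fun m y => if f m < f y then y else m) m) := by
  intro l
  induction l with
  | nil => intro m; rfl
  | cons x t ih =>
    intro m
    simp only [List.foldl_cons]
    by_cases h : f m < f x
    · simp only [if_pos h]
      exact ih x
    · simp only [if_neg h]
      exact ih m

-- B's in-order scan equals A's "max over the positive-score keys, first wins"
lemma sel_main (f : String → Int) (l : List String) :
    (l.foldl (fun (best : String × Int) k => if f k > best.2 then (k, f k) else best)
      ("other", (0 : Int))).1
    = match (l.filter (fun k => decide (0 < f k))).foldl (fun acc x => match acc with
        | none => some x
        | some m => if f m < f x then some x else some m) none with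
      | some m => m
      | none => "other" := by
  induction l with
  | nil => rfl
  | cons k t ih =>
    by_cases hk : 0 < f k
    · simp only [List.foldl_cons, List.filter_cons, decide_eq_true hk, if_pos]
      have hstep : (if f k > ((("other" : String), (0 : Int))).2 then (k, f k)
          else (("other", (0 : Int)))) = (k, f k) := by simp [hk]
      rw [hstep, selB_aux1, sel_aux3 f (t.filter (fun k => decide (0 < f k))) k,
        ← sel_aux2 f t k hk]
    · have hstep : (if f k > ((("other" : String), (0 : Int))).2 then (k, f k)
          else (("other", (0 : Int)))) = ("other", (0 : Int)) := by
        have : ¬ f k > (0 : Int) := by omega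
        simp [this]
      have hf : decide (0 < f k) = false := by simpa using hk
      simp only [List.foldl_cons, List.filter_cons, hf, Bool.false_eq_true, if_false, hstep]
      exact ih

-- ===== VERDICT (by name: the statement is the Claim_ definition above) =====
theorem get_career_domain_spec : Claim_equal_get_career_domain := by
  intro occupations _
  unfold Spec_get_career_domain get_career_domain get_career_domain_alt
  dsimp only
  set S : List (Option String) :=
    PySem.Set.ofList (occupations.map (fun occ => (PySem.Dict.mk occ).get? "qid")) with hS
  set counts : PySem.Dict String Int :=
    S.foldl (fun c q =>
      match q.bind qidToDomain.get? with
      | some domain => c.insert domain (c.getD domain 0 + 1)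
      | none => c) PySem.Dict.empty with hcounts
  set f : String → Int := fun k => counts.getD k 0 with hf
  -- every score that appears equals f of the domain name
  have hscore : ∀ p ∈ careerDomains,
      PySem.Set.len (PySem.Set.inter S (PySem.Set.ofList (p.2.map some))) = f p.1 := by
    intro p hp
    rw [score_eq p hp S]
    rw [show f p.1 = counts.getD p.1 0 from rfl, hcounts, counts_getD]
    simp [PySem.Dict.getD, PySem.Dict.get?, PySem.Dict.empty]
  -- rewrite A's dict-building fold to use f
  have hA : careerDomains.foldl (fun ds p =>
      if PySem.Set.len (PySem.Set.inter S (PySem.Set.ofList (p.2.map some))) > 0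
      then ds.insert p.1 (PySem.Set.len (PySem.Set.inter S (PySem.Set.ofList (p.2.map some))))
      else ds) PySem.Dict.empty
      = careerDomains.foldl (fun ds p =>
          if 0 < f p.1 then ds.insert p.1 (f p.1) else ds) PySem.Dict.empty := by
    apply PySem.List.foldl_congr_mem
    intro ds p hp
    simp only [hscore p hp]
  rw [hA]
  rw [PySem.List.foldl_ite_eq_foldl_filter]
  set filt := careerDomains.filter (fun p => decide (0 < f p.1)) with hfilt
  set ds := filt.foldl (fun ds p => ds.insert p.1 (f p.1)) PySem.Dict.empty with hds
  -- the keys of ds are the positive-score domain names, in order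
  have hnames : filt.map Prod.fst = (careerDomains.map Prod.fst).filter (fun k => decide (0 < f k)) := by
    rw [hfilt, List.filter_map]
    try exact congrArg (List.map Prod.fst) (List.filter_congr (fun p _ => rfl))
  have hkeys : ds.keys = (careerDomains.map Prod.fst).filter (fun k => decide (0 < f k)) := by
    rw [hds, PySem.Dict.keys_foldl_insert_key]
    rw [show (PySem.Dict.empty : PySem.Dict String Int).keys = [] from rfl]
    rw [PySem.Set.update_nil_left, hnames]
    apply PySem.Set.ofList_eq_self_of_nodup
    exact List.Nodup.filter _ (by decide)
  -- on its keys, ds reads back f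
  have hgetD : ∀ k ∈ ds.keys, ds.getD k 0 = f k := by
    intro k hk
    rw [hds, getD_insfold]
    rw [hds, hkeys] at hk
    rw [← hnames] at hk
    simp [hk]
  -- replace the max? key by f, then compare the two selections
  have hmax : PySem.List.max? ds.keys (fun k => ds.getD k 0)
      = ds.keys.foldl (fun acc x => match acc with
          | none => some x
          | some m => if ds.getD m 0 < ds.getD x 0 then some x else some m) none := by
    unfold PySem.List.max?
    apply PySem.List.foldl_congr_mem
    intro acc x _
    cases acc with
    | none => rfl
    | some m => by_cases h : ds.getD m 0 < ds.getD x 0 <;> simp [h]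
  rw [hmax]
  rw [maxfold_congr (fun k => ds.getD k 0) f ds.keys none hgetD (by intro m h; cases h)]
  rw [hkeys]
  rw [show careerDomains.foldl (fun (best : String × Int) p =>
        if counts.getD p.1 0 > best.2 then (p.1, counts.getD p.1 0) else best) ("other", (0 : Int))
      = (careerDomains.map Prod.fst).foldl (fun (best : String × Int) k =>
          if f k > best.2 then (k, f k) else best) ("other", (0 : Int)) by
    rw [List.foldl_map]]
  exact (sel_main f (careerDomains.map Prod.fst)).symm
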